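-- pv_equiv track=rewrite | github.com/valerepetto14/holbertonschool-higher_level_programming | 0x04-python-more_data_structures/7-update_dictionary.py | update_dictionary
-- ===== SOURCE A (Python) =====
-- def update_dictionary(a_dictionary, key, value):
--     for i in a_dictionary:
--         if i == key:
--             a_dictionary.update({i: a_dictionary[i], key: value})
--             return (a_dictionary)
--         else:
--             continue
--     a_dictionary[key] = value
--     return (a_dictionary)
-- ===== SOURCE B (Python) =====
-- def update_dictionary(a_dictionary, key, value):
--     # single insert-or-overwrite; no scan over the keys
--     a_dictionary[key] = value
--     return a_dictionary
-- ===== Notes on version B (the rewrite author's own statement) =====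
-- stated objective: simpler
-- what changed: B drops A's linear scan over the keys and its redundant self-reinserting update({i: d[i], key: value}); it performs the single direct assignment d[key] = value, which already inserts or overwrites.
import Mathlib
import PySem

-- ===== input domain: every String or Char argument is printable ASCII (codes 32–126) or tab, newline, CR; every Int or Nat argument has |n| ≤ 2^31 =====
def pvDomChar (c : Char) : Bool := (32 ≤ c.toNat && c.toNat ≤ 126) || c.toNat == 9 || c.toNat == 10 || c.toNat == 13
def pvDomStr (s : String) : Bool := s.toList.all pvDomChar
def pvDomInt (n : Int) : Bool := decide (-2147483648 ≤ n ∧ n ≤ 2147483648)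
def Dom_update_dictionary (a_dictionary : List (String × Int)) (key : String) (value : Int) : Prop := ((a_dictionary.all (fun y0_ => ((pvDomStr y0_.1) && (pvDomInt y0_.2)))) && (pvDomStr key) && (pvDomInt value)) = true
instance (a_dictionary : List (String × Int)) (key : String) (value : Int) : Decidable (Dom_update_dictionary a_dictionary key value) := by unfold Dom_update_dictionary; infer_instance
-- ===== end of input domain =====

-- B replaces A's scan over the keys (with its redundant self-reinsertion) by the single
-- assignment a_dictionary[key] = value; both mutate the dict argument identically in Python.

-- ===== PORT A =====
-- the for-loop over the dict's keys; when i == key, A does update({i: d[i], key: value}):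
-- d[i] cannot raise here since i is a key of d, so getD's default 0 is never used
def update_dictionary_loop (orig : PySem.Dict String Int) (key : String) (value : Int) : List String → PySem.Dict String Int
  | [] => orig.insert key value
  | i :: rest =>
      if i == key then
        (orig.insert i (orig.getD i 0)).insert key value
      else
        update_dictionary_loop orig key value rest

def update_dictionary (a_dictionary : List (String × Int)) (key : String) (value : Int) : List (String × Int) :=
  let d := PySem.Dict.mk a_dictionary
  (update_dictionary_loop d key value d.keys).items

-- ===== PORT B =====
def update_dictionary_alt (a_dictionary : List (String × Int)) (key : String) (value : Int) : List (String × Int) :=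
  ((PySem.Dict.mk a_dictionary).insert key value).items

-- ===== PRECONDITION & SPEC =====
def Spec_update_dictionary (a_dictionary : List (String × Int)) (key : String) (value : Int) (out : List (String × Int)) : Prop := out = update_dictionary_alt a_dictionary key value
instance (a_dictionary : List (String × Int)) (key : String) (value : Int) (out : List (String × Int)) : Decidable (Spec_update_dictionary a_dictionary key value out) := by unfold Spec_update_dictionary; infer_instance

-- ===== CLAIM (what is proved, stated in full; the proofs are below) =====
def Claim_equal_update_dictionary : Prop := ∀ (a_dictionary : List (String × Int)) (key : String) (value : Int), Dom_update_dictionary a_dictionary key value → Spec_update_dictionary a_dictionary key value (update_dictionary a_dictionary key value)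

-- ===== LEMMAS AND PROOFS =====

-- whatever key list the loop walks, both branches end in (insert key value) of the original dict
theorem update_dictionary_loop_eq (orig : PySem.Dict String Int) (key : String) (value : Int)
    (ks : List String) : update_dictionary_loop orig key value ks = orig.insert key value := by
  induction ks with
  | nil => rfl
  | cons i rest ih =>
      by_cases h : i == key
      · simp only [update_dictionary_loop, h, if_pos]
        have hk : i = key := by simpa using h
        subst hk
        exact PySem.Dict.insert_insert_self orig i (orig.getD i 0) value
      · simp only [update_dictionary_loop, h, ih, if_neg, Bool.false_eq_true, not_false_iff]

-- ===== VERDICT (by name: the statement is the Claim_ definition above) =====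
theorem update_dictionary_spec : Claim_equal_update_dictionary := by
  intro a_dictionary key value _
  show update_dictionary a_dictionary key value = update_dictionary_alt a_dictionary key value
  unfold update_dictionary update_dictionary_alt
  simp only []
  rw [update_dictionary_loop_eq]
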